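-- pv_equiv track=rewrite | github.com/JasonLC506/DeepPSEM | experiment/data_generator.py | local_generate
-- ===== SOURCE A (Python) =====
-- def local_generate(
--         texts,
--         size_context,
--         paddle_index
-- ):
--     assert size_context % 2 == 0
--     size = size_context // 2
--     pads = [paddle_index for _ in range(size)]
--     localToken = []
--     for text in texts:
--         text_pad = pads + text + pads
--         local = [
--             (
--                 text_pad[i - size: i + size + 1]
--             ) for i in range(size, len(text_pad) - size)
--         ]
--         localToken.append(local)
--     return localToken
-- ===== SOURCE B (Python) =====
-- def local_generate(texts, size_context, paddle_index):
--     assert size_context % 2 == 0 and size_context >= 0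
--     size = size_context // 2
--     pads = [paddle_index] * size
--
--     def windows(text):
--         if not text:
--             return []
--         tp = pads + text + pads
--         w = tp[:size_context + 1]
--         out = [w]
--         for x in tp[size_context + 1:]:
--             w = w[1:] + [x]
--             out.append(w)
--         return out
--
--     return [windows(t) for t in texts]
-- ===== Notes on version B (the rewrite author's own statement) =====
-- stated objective: alternative
-- what changed: B builds each text's windows incrementally with a sliding window (drop the head, append the next padded element) accumulated in one pass, instead of A's independent slice per center index, and asserts the context size is nonnegative.
-- outside the precondition, e.g. on local_generate([[1, 2, 3]], -2, 9): A returns [[[1, 2], [], [], [], []]], B raises AssertionError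
import Mathlib
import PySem

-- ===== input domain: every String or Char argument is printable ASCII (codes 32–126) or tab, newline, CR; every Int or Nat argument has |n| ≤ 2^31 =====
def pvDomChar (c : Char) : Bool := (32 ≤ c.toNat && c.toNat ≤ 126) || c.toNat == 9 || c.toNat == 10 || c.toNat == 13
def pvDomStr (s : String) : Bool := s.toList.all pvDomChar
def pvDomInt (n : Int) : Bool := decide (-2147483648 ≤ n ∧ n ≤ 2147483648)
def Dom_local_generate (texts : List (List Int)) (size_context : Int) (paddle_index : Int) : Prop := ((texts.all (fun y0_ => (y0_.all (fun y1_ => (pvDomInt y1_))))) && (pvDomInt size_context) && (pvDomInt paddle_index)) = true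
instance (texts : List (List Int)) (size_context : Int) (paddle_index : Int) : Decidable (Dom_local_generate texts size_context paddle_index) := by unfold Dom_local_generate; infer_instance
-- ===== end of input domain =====

-- B replaces A's fresh slice per center index by an incremental sliding window (drop head, append next element); same asymptotic cost, different mechanism.

-- ===== PORT A =====
def local_generate (texts : List (List Int)) (size_context : Int) (paddle_index : Int) : List (List (List Int)) :=
  let size := PySem.Int.floordiv size_context 2
  let pads := (PySem.List.pyRange 0 size 1).map (fun _ => paddle_index)
  texts.foldl (fun localToken text =>
    let text_pad := pads ++ text ++ pads
    let lcl := (PySem.List.pyRange size ((text_pad.length : Int) - size) 1).map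
      (fun i => PySem.List.slice text_pad (some (i - size)) (some (i + size + 1)))
    localToken ++ [lcl]) []

-- ===== PORT B =====
def local_generate_alt (texts : List (List Int)) (size_context : Int) (paddle_index : Int) : List (List (List Int)) :=
  let size := PySem.Int.floordiv size_context 2
  -- [paddle_index] * size
  let pads := List.replicate size.toNat paddle_index
  texts.map (fun text =>
    if text.isEmpty then []
    else
      let tp := pads ++ text ++ pads
      let w0 := PySem.List.slice tp none (some (size_context + 1))
      ((PySem.List.slice tp (some (size_context + 1)) none).foldl
        (fun (st : List (List Int) × List Int) x =>
          let w := PySem.List.slice st.2 (some 1) none ++ [x]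
          (st.1 ++ [w], w)) ([w0], w0)).1)

-- ===== PRECONDITION & SPEC =====
-- Pre_ excludes the inputs where an assert fails: A's assert on odd size_context (AssertionError), and B's
-- stricter assert on negative even size_context — there A's negative slice bounds wrap around and it returns
-- accidental window lists, while B raises AssertionError on the nonsensical negative context size.
def Pre_local_generate (texts : List (List Int)) (size_context : Int) (paddle_index : Int) : Prop :=
  PySem.Int.mod size_context 2 = 0 ∧ 0 ≤ size_context
instance (texts : List (List Int)) (size_context : Int) (paddle_index : Int) : Decidable (Pre_local_generate texts size_context paddle_index) := by unfold Pre_local_generate; infer_instance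

def pvWitness_local_generate : List (List Int) × Int × Int := ([[1, 2]], 2, 0)

def Spec_local_generate (texts : List (List Int)) (size_context : Int) (paddle_index : Int) (out : List (List (List Int))) : Prop := out = local_generate_alt texts size_context paddle_index
instance (texts : List (List Int)) (size_context : Int) (paddle_index : Int) (out : List (List (List Int))) : Decidable (Spec_local_generate texts size_context paddle_index out) := by unfold Spec_local_generate; infer_instance

-- ===== CLAIM (what is proved, stated in full; the proofs are below) =====
def Claim_equal_local_generate : Prop := ∀ (texts : List (List Int)) (size_context : Int) (paddle_index : Int), Dom_local_generate texts size_context paddle_index → Pre_local_generate texts size_context paddle_index → Spec_local_generate texts size_context paddle_index (local_generate texts size_context paddle_index)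

-- ===== LEMMAS AND PROOFS =====

theorem foldl_append_singleton {α β : Type} (l : List α) (f : α → List β) (init : List (List β)) :
    l.foldl (fun acc x => acc ++ [f x]) init = init ++ l.map f := by
  induction l generalizing init with
  | nil => simp
  | cons x t ih => simp [List.foldl_cons, ih]

-- one sliding step: dropping the head of the current window and appending the next element
-- advances the window by one position
theorem step_eq (tp : List Int) (j m : Nat) (hm : 1 ≤ m) (h : j + m < tp.length) :
    ((tp.drop j).take m).tail ++ [tp[j + m]'h] = (tp.drop (j + 1)).take m := by
  apply List.ext_getElem
  · simp; omega
  · intro i h1 h2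
    have hi : i < m := by simp at h2; omega
    by_cases hlt : i < m - 1
    · rw [List.getElem_append_left (by simp; omega)]
      rw [List.getElem_tail]
      rw [List.getElem_take, List.getElem_drop]
      rw [List.getElem_take, List.getElem_drop]
      congr 1; omega
    · have hieq : i = m - 1 := by omega
      rw [List.getElem_append_right (by simp; omega)]
      simp only [List.length_tail, List.length_take]
      rw [List.getElem_singleton]
      rw [List.getElem_take, List.getElem_drop]
      congr 1; omega

-- the sliding-window loop produces exactly the successive windows
theorem slide_eq (tp : List Int) (m : Nat) (hm : 1 ≤ m) :
    ∀ (r j : Nat) (acc : List (List Int)), j + m + r = tp.length →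
    ((tp.drop (j + m)).foldl
        (fun (st : List (List Int) × List Int) x =>
          (st.1 ++ [st.2.tail ++ [x]], st.2.tail ++ [x]))
        (acc, (tp.drop j).take m)).1
      = acc ++ (List.range r).map (fun i => (tp.drop (j + 1 + i)).take m) := by
  intro r
  induction r with
  | zero =>
    intro j acc h
    have hnil : tp.drop (j + m) = [] := List.drop_eq_nil_of_le (by omega)
    simp [hnil]
  | succ r ih =>
    intro j acc h
    have hj : j + m < tp.length := by omega
    rw [List.drop_eq_getElem_cons hj, List.foldl_cons]
    simp only []
    rw [step_eq tp j m hm hj]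
    have hd : tp.drop (j + m + 1) = tp.drop ((j + 1) + m) := by congr 1; omega
    rw [hd, ih (j + 1) (acc ++ [(tp.drop (j + 1)).take m]) (by omega)]
    rw [List.range_succ_eq_map, List.map_cons, List.map_map, List.append_assoc]
    congr 1
    rw [List.singleton_append]
    congr 1
    apply List.map_congr_left
    intro i _
    have : j + 1 + 1 + i = j + 1 + (i + 1) := by omega
    simp only [Function.comp_apply, Nat.succ_eq_add_one, this]

-- A's per-text comprehension, normalised to successive windows
theorem A_side (tp : List Int) (s : Nat) (hs : 2 * s ≤ tp.length) :
    (PySem.List.pyRange (s : Int) ((tp.length : Int) - (s : Int)) 1).map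
        (fun i => PySem.List.slice tp (some (i - (s : Int))) (some (i + (s : Int) + 1)))
      = (List.range (tp.length - 2 * s)).map (fun j => (tp.drop j).take (2 * s + 1)) := by
  rw [PySem.List.pyRange_one, List.map_map]
  have hcnt : (((tp.length : Int) - (s : Int)) - (s : Int)).toNat = tp.length - 2 * s := by omega
  rw [hcnt]
  apply List.map_congr_left
  intro j _
  have e1 : ((s : Int) + (j : Nat)) - (s : Int) = ((j : Int)) := by ring
  have e2 : ((s : Int) + (j : Nat)) + (s : Int) + 1 = ((j : Int)) + (((2 * s + 1 : Nat) : Int)) := by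
    push_cast; ring
  simp only [Function.comp_apply, e1, e2]
  rw [PySem.List.slice_natCast_add]

-- B's per-text sliding loop, normalised to successive windows
theorem B_side (tp : List Int) (m : Nat) (hm : 1 ≤ m) (hlen : m ≤ tp.length) :
    ((tp.drop m).foldl
        (fun (st : List (List Int) × List Int) x =>
          (st.1 ++ [st.2.tail ++ [x]], st.2.tail ++ [x]))
        ([tp.take m], tp.take m)).1
      = (List.range (tp.length - m + 1)).map (fun j => (tp.drop j).take m) := by
  have h0 := slide_eq tp m hm (tp.length - m) 0 [tp.take m] (by omega)
  simp only [Nat.zero_add, List.drop_zero] at h0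
  rw [h0]
  rw [List.range_succ_eq_map, List.map_cons, List.map_map, List.singleton_append]
  refine List.cons_eq_cons.mpr ⟨by simp, ?_⟩
  apply List.map_congr_left
  intro a _
  simp only [Function.comp_apply, Nat.succ_eq_add_one]
  rw [Nat.add_comm 1 a]

-- from the precondition: size_context = 2 * (size_context // 2)
theorem even_split (sc : Int) (h : PySem.Int.mod sc 2 = 0) :
    sc = PySem.Int.floordiv sc 2 * 2 := by
  have := PySem.Int.floordiv_mul_add_mod sc 2
  omega

-- ===== VERDICT (by name: the statement is the Claim_ definition above) =====
theorem local_generate_spec : Claim_equal_local_generate := by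
  intro texts sc p _ hpre
  obtain ⟨hmod, hsc⟩ := hpre
  show local_generate texts sc p = local_generate_alt texts sc p
  have heq := even_split sc hmod
  set szI := PySem.Int.floordiv sc 2 with hszI
  have hszI0 : 0 ≤ szI := by omega
  set s : Nat := szI.toNat with hsnat
  have hcast : (s : Int) = szI := Int.toNat_of_nonneg hszI0
  have hpads : (PySem.List.pyRange 0 szI 1).map (fun _ => p) = List.replicate s p := by
    rw [PySem.List.pyRange_one]
    rw [List.map_map]
    have : ((szI : Int) - 0).toNat = s := by omega
    rw [this]
    simp [Function.comp_def, List.map_const']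
  have hsc1 : sc + 1 = (((2 * s + 1 : Nat) : Int)) := by push_cast; omega
  simp only [local_generate, local_generate_alt]
  rw [← hszI, foldl_append_singleton, List.nil_append, hpads, hsc1]
  apply List.map_congr_left
  intro text _
  set tp := List.replicate s p ++ text ++ List.replicate s p with htp
  have hlen : tp.length = text.length + 2 * s := by simp [htp]; omega
  by_cases hempty : text = []
  · subst hempty
    rw [if_pos (by simp)]
    norm_num at hlen
    rw [← hcast]
    have hb : ((tp.length : Int) - (s : Int)) = (s : Int) := by push_cast; omega
    rw [hb, PySem.List.pyRange_one_eq_nil le_rfl, List.map_nil]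
  · rw [if_neg (by simpa using hempty)]
    rw [PySem.List.slice_to_natCast, PySem.List.slice_from_natCast]
    simp only [PySem.List.slice_from_one]
    have hm : 1 ≤ 2 * s + 1 := by omega
    have hmlen : 2 * s + 1 ≤ tp.length := by
      have : text.length ≠ 0 := fun h => hempty (List.eq_nil_of_length_eq_zero h)
      omega
    rw [← hcast, A_side tp s (by omega), B_side tp (2 * s + 1) hm hmlen]
    have : tp.length - (2 * s + 1) + 1 = tp.length - 2 * s := by
      have : text.length ≠ 0 := fun h => hempty (List.eq_nil_of_length_eq_zero h)
      omega
    rw [this]
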